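-- pv_equiv track=rewrite | github.com/AlexEduardo-zip/TP1_ALG2_LZW_Published | LZW ALGORITMO/LZW.py | compress_with_variable_size
-- ===== SOURCE A (Python) =====
-- class CompactTrie:
--     def __init__(self):
--         self.trie = {}
--         self.codes = {}
--         self.size = 0
--
--     def insert(self, binary_str, code):
--         node = self.trie
--         for bit in binary_str:
--             if bit not in node:
--                 node[bit] = {}
--             node = node[bit]
--         node['code'] = code
--         self.codes[binary_str] = code
--         self.size += 1
--
--     def search(self, binary_str):
--         node = self.trie
--         for bit in binary_str:
--             if bit not in node:
--                 return None
--             node = node[bit]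
--         return node.get('code', None)
--
-- def collect_statistics(stats, event, value):
--     if event not in stats:
--         stats[event] = []
--     stats[event].append(value)
--
-- def compress_with_variable_size(text, initial_bit_limit, max_bit_limit, stats):
--     trie = CompactTrie()
--     next_code = 256
--     current_bit_limit = initial_bit_limit
--     max_table_size = 2 ** current_bit_limit
--
--     for i in range(256):
--         trie.insert(format(i, "08b"), i)
--
--     current_string = ""
--     compressed_output = []
--
--     for symbol in text:
--         binary_symbol = format(ord(symbol), "08b")
--         combined_string = current_string + binary_symbol
--
--         if trie.search(combined_string) is not None:
--             current_string = combined_string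
--         else:
--             code = trie.search(current_string)
--             if code is None:
--                 raise ValueError(f"Erro: string não encontrada na Trie ({current_string})")
--
--             compressed_output.append(code)
--
--             if next_code < max_table_size:
--                 trie.insert(combined_string, next_code)
--                 next_code += 1
--
--                 if next_code >= max_table_size and current_bit_limit < max_bit_limit:
--                     current_bit_limit += 1
--                     max_table_size = 2 ** current_bit_limit
--
--             current_string = binary_symbol
--
--         collect_statistics(stats, 'compressed_output', len(compressed_output))
--         collect_statistics(stats, 'trie_size', trie.size)
--
--     if current_string:
--         code = trie.search(current_string)
--         if code is None:
--             raise ValueError(f"Erro: string final não encontrada na Trie ({current_string})")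
--         compressed_output.append(code)
--         collect_statistics(stats, 'compressed_output', len(compressed_output))
--
--     return compressed_output, current_bit_limit
-- ===== SOURCE B (Python) =====
-- # B: classic LZW over a flat dict keyed by (prefix_code, symbol_ord); the state is the
-- # code of the current match, so no bit-trie, no 8-bit string encoding and no string
-- # concatenation is ever built.  Mutates `stats` in place exactly like A.
--
-- def collect_statistics(stats, event, value):
--     if event not in stats:
--         stats[event] = []
--     stats[event].append(value)
--
-- def compress_with_variable_size(text, initial_bit_limit, max_bit_limit, stats):
--     table = {}  # (prefix_code, symbol_ord) -> code; single symbols are their own codes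
--     next_code = 256
--     current_bit_limit = initial_bit_limit
--     max_table_size = 2 ** current_bit_limit
--
--     current = -1  # -1 = no current match
--     compressed_output = []
--
--     for symbol in text:
--         b = ord(symbol)
--         if current == -1:
--             current = b
--         elif (current, b) in table:
--             current = table[(current, b)]
--         else:
--             compressed_output.append(current)
--             if next_code < max_table_size:
--                 table[(current, b)] = next_code
--                 next_code += 1
--                 if next_code >= max_table_size and current_bit_limit < max_bit_limit:
--                     current_bit_limit += 1
--                     max_table_size = 2 ** current_bit_limit
--             current = b
--         collect_statistics(stats, 'compressed_output', len(compressed_output))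
--         collect_statistics(stats, 'trie_size', next_code)
--
--     if current != -1:
--         compressed_output.append(current)
--         collect_statistics(stats, 'compressed_output', len(compressed_output))
--
--     return compressed_output, current_bit_limit
-- ===== Notes on version B (the rewrite author's own statement) =====
-- stated objective: faster
-- what changed: Replaces the bit-trie over 8-bit binary string encodings (which re-walks the whole growing match string on every symbol) with the classic LZW dictionary keyed by (prefix_code, symbol), keeping only the current match's code as state, so each symbol costs O(1) instead of O(match length * 8).
import Mathlib
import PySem

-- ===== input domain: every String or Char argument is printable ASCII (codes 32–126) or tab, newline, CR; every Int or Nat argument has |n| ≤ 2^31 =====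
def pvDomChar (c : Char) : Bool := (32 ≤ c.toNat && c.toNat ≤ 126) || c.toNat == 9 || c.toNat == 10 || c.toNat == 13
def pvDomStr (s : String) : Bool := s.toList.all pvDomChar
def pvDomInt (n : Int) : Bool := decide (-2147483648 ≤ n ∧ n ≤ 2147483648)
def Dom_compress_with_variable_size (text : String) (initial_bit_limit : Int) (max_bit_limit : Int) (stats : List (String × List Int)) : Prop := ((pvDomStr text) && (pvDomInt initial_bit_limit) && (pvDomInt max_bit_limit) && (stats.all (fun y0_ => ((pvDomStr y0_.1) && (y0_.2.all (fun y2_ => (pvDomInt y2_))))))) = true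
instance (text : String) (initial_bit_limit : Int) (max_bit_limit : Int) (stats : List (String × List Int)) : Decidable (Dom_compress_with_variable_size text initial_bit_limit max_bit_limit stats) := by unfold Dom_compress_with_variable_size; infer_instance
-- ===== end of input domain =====

-- B replaces A's bit-trie over 8-bit binary encodings with the classic LZW dictionary keyed by
-- (prefix code, symbol), keeping only the current match's CODE as state (objective: faster).
-- Both Pythons also mutate `stats` in place (identically); the equivalence proved here is about
-- the RETURN value, which never depends on `stats`, so both ports ignore that argument.

-- ===== PORT A =====

-- `2 ** e` as used in A: it is only ever COMPARED against next_code ≥ 256, and for e < 0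
-- Python's 2**e is a float in (0,1), which compares to any integer ≥ 256 exactly like 0 does.
def pyPow2 (e : Int) : Int := if e < 0 then 0 else 2 ^ e.toNat

-- A's CompactTrie: nested dicts whose keys are always '0'/'1' (they come from format(_, "08b")),
-- plus an optional 'code' entry at each node; `.nil` is an absent child, `.node` a dict.
-- (self.codes and self.size are write-only bookkeeping that never reaches the return value.)
-- A's CompactTrie: nested dicts whose keys are always '0'/'1' (they come from format(_, "08b")),
-- plus an optional 'code' entry at each node; `.nil` is an absent child, `.node` a dict.
-- (self.codes and self.size are write-only bookkeeping that never reaches the return value.)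
inductive Trie where
  | nil : Trie
  | node : Option Int → Trie → Trie → Trie

def trieInsert : Trie → List Char → Int → Trie
  | .nil, [], v => .node (some v) .nil .nil
  | .node _ z o, [], v => .node (some v) z o
  | .nil, c :: cs, v =>
      if c = '0' then .node none (trieInsert .nil cs v) .nil
      else .node none .nil (trieInsert .nil cs v)
  | .node cd z o, c :: cs, v =>
      if c = '0' then .node cd (trieInsert z cs v) o
      else .node cd z (trieInsert o cs v)

def trieSearch : Trie → List Char → Option Int
  | .nil, _ => none
  | .node cd _ _, [] => cd
  | .node _ z o, c :: cs => trieSearch (if c = '0' then z else o) cs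

-- format(i, "08b"): exact for 0 ≤ i < 256, the only arguments reached on Dom inputs
-- (range(256) and ord(symbol) with symbol printable ASCII / tab / newline / CR).
-- format(i, "08b"): exact for 0 ≤ i < 256, the only arguments reached on Dom inputs
-- (range(256) and ord(symbol) with symbol printable ASCII / tab / newline / CR).
def pyFormat08b (i : Int) : List Char :=
  (List.range 8).map (fun k => if i.toNat.testBit (7 - k) then '1' else '0')

-- ===== LEMMAS AND PROOFS =====

-- The bit a trie edge distinguishes: both ports' data agree up to this projection, since every
-- string in play is a concatenation of pyFormat08b blocks, whose characters are '0'/'1'.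
structure AState where
  trie : Trie
  cur : List Char
  nextCode : Int
  bitLimit : Int
  maxTable : Int
  out : List Int

def stepA (mbl : Int) (st : AState) (symbol : Char) : AState :=
  -- binary_symbol = format(ord(symbol), "08b"); combined_string = current_string + binary_symbol
  match trieSearch st.trie (st.cur ++ pyFormat08b (symbol.toNat : Int)) with
  | some _ => { st with cur := st.cur ++ pyFormat08b (symbol.toNat : Int) }
  | none =>
    match trieSearch st.trie st.cur with
    | none => st   -- Python raises ValueError here; unreachable on Dom inputs (proved by the invariant)
    | some code =>
      if st.nextCode < st.maxTable then
        if st.maxTable ≤ st.nextCode + 1 ∧ st.bitLimit < mbl then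
          { trie := trieInsert st.trie (st.cur ++ pyFormat08b (symbol.toNat : Int)) st.nextCode,
            cur := pyFormat08b (symbol.toNat : Int), nextCode := st.nextCode + 1,
            bitLimit := st.bitLimit + 1, maxTable := pyPow2 (st.bitLimit + 1),
            out := st.out ++ [code] }
        else
          { trie := trieInsert st.trie (st.cur ++ pyFormat08b (symbol.toNat : Int)) st.nextCode,
            cur := pyFormat08b (symbol.toNat : Int), nextCode := st.nextCode + 1,
            bitLimit := st.bitLimit, maxTable := st.maxTable,
            out := st.out ++ [code] }
      else { st with cur := pyFormat08b (symbol.toNat : Int), out := st.out ++ [code] }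


def compress_with_variable_size (text : String) (initial_bit_limit : Int) (max_bit_limit : Int)
    (_stats : List (String × List Int)) : List Int × Int :=
  let trie0 := (List.range 256).foldl (fun t (i : Nat) => trieInsert t (pyFormat08b (i : Int)) (i : Int)) .nil
  let st := text.toList.foldl (stepA max_bit_limit)
    ⟨trie0, [], 256, initial_bit_limit, pyPow2 initial_bit_limit, []⟩
  if st.cur ≠ [] then
    match trieSearch st.trie st.cur with
    | some code => (st.out ++ [code], st.bitLimit)
    | none => (st.out, st.bitLimit)   -- Python raises ValueError here; unreachable on Dom inputs
  else (st.out, st.bitLimit)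

-- ===== PORT B =====

structure BState where
  table : PySem.Dict (Int × Int) Int
  cur : Int
  nextCode : Int
  bitLimit : Int
  maxTable : Int
  out : List Int

def stepB (mbl : Int) (st : BState) (symbol : Char) : BState :=
  if st.cur = -1 then { st with cur := (symbol.toNat : Int) }
  else
    match st.table.get? (st.cur, (symbol.toNat : Int)) with
    | some v => { st with cur := v }
    | none =>
      if st.nextCode < st.maxTable then
        if st.maxTable ≤ st.nextCode + 1 ∧ st.bitLimit < mbl then
          { table := st.table.insert (st.cur, (symbol.toNat : Int)) st.nextCode,
            cur := (symbol.toNat : Int), nextCode := st.nextCode + 1,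
            bitLimit := st.bitLimit + 1, maxTable := pyPow2 (st.bitLimit + 1),
            out := st.out ++ [st.cur] }
        else
          { table := st.table.insert (st.cur, (symbol.toNat : Int)) st.nextCode,
            cur := (symbol.toNat : Int), nextCode := st.nextCode + 1,
            bitLimit := st.bitLimit, maxTable := st.maxTable,
            out := st.out ++ [st.cur] }
      else { st with cur := (symbol.toNat : Int), out := st.out ++ [st.cur] }


def compress_with_variable_size_alt (text : String) (initial_bit_limit : Int) (max_bit_limit : Int)
    (_stats : List (String × List Int)) : List Int × Int :=
  let st := text.toList.foldl (stepB max_bit_limit)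
    ⟨PySem.Dict.empty, -1, 256, initial_bit_limit, pyPow2 initial_bit_limit, []⟩
  if st.cur ≠ -1 then (st.out ++ [st.cur], st.bitLimit) else (st.out, st.bitLimit)

-- ===== PRECONDITION & SPEC =====
def Spec_compress_with_variable_size (text : String) (initial_bit_limit : Int) (max_bit_limit : Int) (stats : List (String × List Int)) (out : List Int × Int) : Prop := out = compress_with_variable_size_alt text initial_bit_limit max_bit_limit stats
instance (text : String) (initial_bit_limit : Int) (max_bit_limit : Int) (stats : List (String × List Int)) (out : List Int × Int) : Decidable (Spec_compress_with_variable_size text initial_bit_limit max_bit_limit stats out) := by unfold Spec_compress_with_variable_size; infer_instance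

-- ===== CLAIM (what is proved, stated in full; the proofs are below) =====
def Claim_equal_compress_with_variable_size : Prop := ∀ (text : String) (initial_bit_limit : Int) (max_bit_limit : Int) (stats : List (String × List Int)), Dom_compress_with_variable_size text initial_bit_limit max_bit_limit stats → Spec_compress_with_variable_size text initial_bit_limit max_bit_limit stats (compress_with_variable_size text initial_bit_limit max_bit_limit stats)

-- ===== LEMMAS AND PROOFS =====

def bkey (s : List Char) : List Bool := s.map (fun c => c == '0')

-- code ↦ its entry, string ↦ its entry, in an association list of (code, bit-string) pairs
def findStr (L : List (Int × List Char)) (c : Int) : Option (List Char) :=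
  (L.find? (fun e => e.1 == c)).map Prod.snd
def findCode (L : List (Int × List Char)) (q : List Char) : Option Int :=
  (L.find? (fun e => bkey e.2 == bkey q)).map Prod.fst

theorem bkey_length (s : List Char) : (bkey s).length = s.length := by simp [bkey]

theorem bkey_append (s t : List Char) : bkey (s ++ t) = bkey s ++ bkey t := by simp [bkey]

theorem findCode_congr (L : List (Int × List Char)) {q q' : List Char} (h : bkey q = bkey q') :
    findCode L q = findCode L q' := by simp [findCode, h]

theorem trieSearch_nil (q : List Char) : trieSearch .nil q = none := by cases q <;> rfl

theorem trieSearch_insert (k : List Char) : ∀ (t : Trie) (q : List Char) (v : Int),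
    trieSearch (trieInsert t k v) q = if bkey q = bkey k then some v else trieSearch t q := by
  induction k with
  | nil =>
    intro t q v
    cases t <;> cases q <;> simp [trieInsert, trieSearch, bkey, trieSearch_nil]
  | cons b bs ih =>
    intro t q v
    cases t with
    | nil =>
      cases q with
      | nil => simp [trieInsert, trieSearch, bkey] <;> split_ifs <;> simp [trieSearch]
      | cons c cs =>
        by_cases hb : b = '0' <;> by_cases hc : c = '0' <;>
          simp [trieInsert, trieSearch, bkey, hb, hc, ih, trieSearch_nil]
    | node cd z o =>
      cases q with
      | nil => simp [trieInsert, trieSearch, bkey] <;> split_ifs <;> simp [trieSearch]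
      | cons c cs =>
        by_cases hb : b = '0' <;> by_cases hc : c = '0' <;>
          simp [trieInsert, trieSearch, bkey, hb, hc, ih]


theorem findStr_append_single (L : List (Int × List Char)) (n : Int) (t : List Char) (c : Int) :
    findStr (L ++ [(n, t)]) c = (findStr L c).or (if n = c then some t else none) := by
  unfold findStr
  rw [List.find?_append]
  cases hf : L.find? (fun e => e.1 == c) with
  | some e => simp
  | none =>
    by_cases hnc : n = c
    · simp [List.find?, hnc]
    · have h2 : (n == c) = false := beq_eq_false_iff_ne.mpr hnc
      simp [List.find?, h2, hnc]


theorem findCode_append_single (L : List (Int × List Char)) (n : Int) (t : List Char) (q : List Char) :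
    findCode (L ++ [(n, t)]) q = (findCode L q).or (if bkey t = bkey q then some n else none) := by
  unfold findCode
  rw [List.find?_append]
  cases hf : L.find? (fun e => bkey e.2 == bkey q) with
  | some e => simp
  | none =>
    by_cases hnc : bkey t = bkey q
    · simp [List.find?, hnc]
    · have h2 : (bkey t == bkey q) = false := beq_eq_false_iff_ne.mpr hnc
      simp [List.find?, h2, hnc]


theorem bkey_pyFormat08b (m : Int) :
    bkey (pyFormat08b m) = (List.range 8).map (fun k => !(m.toNat.testBit (7 - k))) := by
  simp only [bkey, pyFormat08b, List.map_map]
  apply List.map_congr_left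
  intro k _
  cases htb : m.toNat.testBit (7 - k) <;> simp [htb]

theorem pyFormat08b_bkey_inj {i j : Int} (h0 : 0 ≤ i) (h1 : i < 256) (h2 : 0 ≤ j) (h3 : j < 256)
    (h : bkey (pyFormat08b i) = bkey (pyFormat08b j)) : i = j := by
  rw [bkey_pyFormat08b, bkey_pyFormat08b] at h
  have hpt : ∀ k, k < 8 → i.toNat.testBit (7 - k) = j.toNat.testBit (7 - k) := by
    intro k hk
    have hg := congrArg (fun l => l[k]?) h
    simp [hk] at hg
    simpa using hg
  have hij : i.toNat = j.toNat := by
    apply Nat.eq_of_testBit_eq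
    intro m
    by_cases hm : m < 8
    · have := hpt (7 - m) (by omega)
      rwa [show 7 - (7 - m) = m by omega] at this
    · have h256 : (256 : Nat) ≤ 2 ^ m := by
        calc (256 : Nat) = 2 ^ 8 := by norm_num
        _ ≤ 2 ^ m := Nat.pow_le_pow_right (by norm_num) (by omega)
      rw [Nat.testBit_lt_two_pow (by omega), Nat.testBit_lt_two_pow (by omega)]
  omega


theorem pyFormat08b_length (i : Int) : (pyFormat08b i).length = 8 := by simp [pyFormat08b]

structure LZInv (Full : List (Int × List Char)) (a : AState) (b : BState) : Prop where
  search_eq : ∀ q, trieSearch a.trie q = findCode Full q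
  table_sub : ∀ p bb v : Int, b.table.get? (p, bb) = some v →
      ∃ sp, findStr Full p = some sp ∧ findCode Full (sp ++ pyFormat08b bb) = some v
  decomp : ∀ e ∈ Full, e.2.length = 8 ∨ ∃ p sp bb, 0 ≤ bb ∧ bb < 256 ∧
      findStr Full p = some sp ∧ bkey e.2 = bkey sp ++ bkey (pyFormat08b bb) ∧
      b.table.get? (p, bb) = some e.1
  cur_rel : (a.cur = [] ∧ b.cur = -1) ∨ (0 ≤ b.cur ∧ ∃ s', findStr Full b.cur = some s' ∧
      bkey s' = bkey a.cur ∧ findCode Full a.cur = some b.cur)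
  codes_lb : ∀ e ∈ Full, 0 ≤ e.1 ∧ e.1 < a.nextCode
  len_ge : ∀ e ∈ Full, 8 ≤ e.2.length
  str_code : ∀ c s, findStr Full c = some s → findCode Full s = some c
  code_str : ∀ q c, findCode Full q = some c → ∃ t, findStr Full c = some t ∧ bkey t = bkey q
  base : ∀ i : Int, 0 ≤ i → i < 256 →
      findStr Full i = some (pyFormat08b i) ∧ findCode Full (pyFormat08b i) = some i
  nc_ge : 256 ≤ a.nextCode
  eq_nc : a.nextCode = b.nextCode
  eq_bl : a.bitLimit = b.bitLimit
  eq_mt : a.maxTable = b.maxTable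
  eq_out : a.out = b.out


def F (n : Nat) : List (Int × List Char) := (List.range n).map (fun (i : Nat) => ((i : Int), pyFormat08b (i : Int)))

theorem F_succ (n : Nat) : F (n+1) = F n ++ [((n : Int), pyFormat08b (n : Int))] := by
  simp [F, List.range_succ]

theorem findStr_F (n : Nat) (c : Int) :
    findStr (F n) c = if 0 ≤ c ∧ c < n then some (pyFormat08b c) else none := by
  induction n with
  | zero => simp [F, findStr]
  | succ n ih =>
    rw [F_succ, findStr_append_single, ih]
    by_cases h1 : 0 ≤ c ∧ c < n
    · rw [if_pos h1, if_pos (by omega : 0 ≤ c ∧ c < ((n+1 : Nat) : Int))]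
      simp
    · rw [if_neg h1]
      by_cases h2 : (n : Int) = c
      · rw [if_pos h2, if_pos (by omega : 0 ≤ c ∧ c < ((n+1 : Nat) : Int))]
        simp [← h2]
      · rw [if_neg h2, if_neg (by omega : ¬(0 ≤ c ∧ c < ((n+1 : Nat) : Int)))]
        simp

theorem findCode_F_none (n : Nat) (q : List Char)
    (hfresh : ∀ i : Nat, i < n → bkey (pyFormat08b (i : Int)) ≠ bkey q) :
    findCode (F n) q = none := by
  induction n with
  | zero => simp [F, findCode]
  | succ n ih =>
    rw [F_succ, findCode_append_single, ih (fun i hi => hfresh i (by omega))]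
    simp [hfresh n (by omega)]

theorem findCode_F_enc (n : Nat) (hn : n ≤ 256) (i : Nat) (hi : i < n) :
    findCode (F n) (pyFormat08b (i : Int)) = some (i : Int) := by
  induction n with
  | zero => omega
  | succ n ih =>
    rw [F_succ, findCode_append_single]
    by_cases h1 : i < n
    · rw [ih (by omega) h1]; simp
    · have hin : i = n := by omega
      subst hin
      rw [findCode_F_none _ _ (fun j hj hbk => by
        have := pyFormat08b_bkey_inj (i := (j : Int)) (j := (i : Int))
          (by omega) (by omega) (by omega) (by omega) hbk
        omega)]
      simp

theorem fold_insert_search : ∀ (l : List Nat) (t : Trie) (L : List (Int × List Char)),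
    (∀ q, trieSearch t q = findCode L q) →
    (∀ i : Nat, i ∈ l → findCode L (pyFormat08b (i : Int)) = none) →
    l.Pairwise (fun i j : Nat => bkey (pyFormat08b (i : Int)) ≠ bkey (pyFormat08b (j : Int))) →
    ∀ q, trieSearch (l.foldl (fun t (i : Nat) => trieInsert t (pyFormat08b (i : Int)) (i : Int)) t) q
       = findCode (L ++ l.map (fun i : Nat => ((i : Int), pyFormat08b (i : Int)))) q := by
  intro l
  induction l with
  | nil => intro t L hq _ _ q; simpa using hq q
  | cons i l ih =>
    intro t L hq hfresh hpw q
    have hq' : ∀ q, trieSearch (trieInsert t (pyFormat08b (i : Int)) (i : Int)) q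
        = findCode (L ++ [((i : Int), pyFormat08b (i : Int))]) q := by
      intro q'
      rw [trieSearch_insert, hq q', findCode_append_single]
      cases hL : findCode L q' with
      | some w =>
        have hne : ¬ bkey q' = bkey (pyFormat08b (i : Int)) := by
          intro hbe
          rw [findCode_congr L hbe, hfresh i (List.mem_cons_self ..)] at hL
          simp at hL
        rw [if_neg hne]; simp
      | none =>
        simp only [Option.none_or]
        by_cases hbe : bkey q' = bkey (pyFormat08b (i : Int))
        · rw [if_pos hbe, if_pos hbe.symm]
        · rw [if_neg hbe, if_neg (fun h : bkey (pyFormat08b (i : Int)) = bkey q' => hbe h.symm)]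
    have hfresh' : ∀ j ∈ l, findCode (L ++ [((i : Int), pyFormat08b (i : Int))]) (pyFormat08b (j : Int)) = none := by
      intro j hj
      rw [findCode_append_single, hfresh j (List.mem_cons_of_mem _ hj)]
      simp [(List.pairwise_cons.mp hpw).1 j hj]
    have := ih _ _ hq' hfresh' (List.pairwise_cons.mp hpw).2 q
    simpa [List.foldl_cons, List.append_assoc] using this

theorem mem_F256 {e : Int × List Char} (he : e ∈ F 256) :
    ∃ i : Nat, i < 256 ∧ e = ((i : Int), pyFormat08b (i : Int)) := by
  obtain ⟨i, hi, rfl⟩ := List.mem_map.mp he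
  exact ⟨i, List.mem_range.mp hi, rfl⟩

set_option maxRecDepth 10000 in
theorem init_inv (ibl : Int) : LZInv (F 256)
    ⟨(List.range 256).foldl (fun t (i : Nat) => trieInsert t (pyFormat08b (i : Int)) (i : Int)) .nil,
      [], 256, ibl, pyPow2 ibl, []⟩
    ⟨PySem.Dict.empty, -1, 256, ibl, pyPow2 ibl, []⟩ := by
  have hpw : (List.range 256).Pairwise
      (fun i j : Nat => bkey (pyFormat08b (i : Int)) ≠ bkey (pyFormat08b (j : Int))) := by
    refine List.Pairwise.imp_of_mem ?_ (List.pairwise_lt_range (n := 256))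
    intro a b ha hb hlt hbk
    have h1 := List.mem_range.mp ha
    have h2 := List.mem_range.mp hb
    have := pyFormat08b_bkey_inj (i := (a : Int)) (j := (b : Int))
      (by omega) (by omega) (by omega) (by omega) hbk
    omega
  have hsearch : ∀ q, trieSearch ((List.range 256).foldl
      (fun t (i : Nat) => trieInsert t (pyFormat08b (i : Int)) (i : Int)) .nil) q
      = findCode (F 256) q := by
    intro q
    have := fold_insert_search (List.range 256) .nil []
      (fun q => by rw [trieSearch_nil]; simp [findCode])
      (fun i _ => by simp [findCode])
      hpw q
    simpa [F] using this
  refine ⟨hsearch, ?_, ?_, ?_, ?_, ?_, ?_, ?_, ?_, by norm_num, rfl, rfl, rfl, rfl⟩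
  · intro p bb v hget
    rw [PySem.Dict.get?_empty] at hget
    simp at hget
  · intro e he
    obtain ⟨i, hi, rfl⟩ := mem_F256 he
    exact Or.inl (pyFormat08b_length _)
  · exact Or.inl ⟨rfl, rfl⟩
  · intro e he
    obtain ⟨i, hi, rfl⟩ := mem_F256 he
    refine ⟨?_, ?_⟩ <;> simp <;> omega
  · intro e he
    obtain ⟨i, hi, rfl⟩ := mem_F256 he
    simp [pyFormat08b_length]
  · intro c s hcs
    rw [findStr_F] at hcs
    by_cases hb : 0 ≤ c ∧ c < 256
    · rw [if_pos (by omega)] at hcs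
      obtain rfl : s = pyFormat08b c := by exact (Option.some.inj hcs).symm
      have := findCode_F_enc 256 le_rfl c.toNat (by omega)
      rwa [Int.toNat_of_nonneg hb.1] at this
    · rw [if_neg (by omega)] at hcs
      simp at hcs
  · intro q c hqc
    obtain ⟨e, hfind, he1⟩ := Option.map_eq_some_iff.mp hqc
    have hpred := List.find?_some hfind
    have hmem := List.mem_of_find?_eq_some hfind
    obtain ⟨i, hi, rfl⟩ := mem_F256 hmem
    simp only [beq_iff_eq] at hpred
    refine ⟨pyFormat08b (i : Int), ?_, hpred⟩
    rw [← he1]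
    rw [findStr_F]
    rw [if_pos (by omega)]
  · intro i h0 h1
    constructor
    · rw [findStr_F, if_pos (by omega)]
    · have := findCode_F_enc 256 le_rfl i.toNat (by omega)
      rwa [Int.toNat_of_nonneg h0] at this

theorem findStr_mem {L : List (Int × List Char)} {c : Int} {s : List Char}
    (h : findStr L c = some s) : (c, s) ∈ L := by
  obtain ⟨e, hfind, he⟩ := Option.map_eq_some_iff.mp h
  have hpred := List.find?_some hfind
  simp only [beq_iff_eq] at hpred
  have := List.mem_of_find?_eq_some hfind
  rwa [show e = (c, s) from Prod.ext hpred he] at this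

theorem findCode_mem {L : List (Int × List Char)} {q : List Char} {c : Int}
    (h : findCode L q = some c) : ∃ t, (c, t) ∈ L ∧ bkey t = bkey q := by
  obtain ⟨e, hfind, he⟩ := Option.map_eq_some_iff.mp h
  have hpred := List.find?_some hfind
  simp only [beq_iff_eq] at hpred
  refine ⟨e.2, ?_, hpred⟩
  have := List.mem_of_find?_eq_some hfind
  rwa [show (c, e.2) = e from Prod.ext he.symm rfl]

theorem findStr_fresh {L : List (Int × List Char)} {n : Int}
    (h : ∀ e ∈ L, e.1 < n) : findStr L n = none := by
  cases hf : findStr L n with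
  | none => rfl
  | some s =>
    exact absurd (h _ (findStr_mem hf)) (lt_irrefl n)

theorem findStr_append_of_some {L : List (Int × List Char)} {c : Int} {s : List Char}
    (x : Int × List Char) (h : findStr L c = some s) : findStr (L ++ [x]) c = some s := by
  rw [findStr_append_single, h]; rfl

theorem findCode_append_of_some {L : List (Int × List Char)} {q : List Char} {c : Int}
    (x : Int × List Char) (h : findCode L q = some c) : findCode (L ++ [x]) q = some c := by
  rw [findCode_append_single, h]; rfl

theorem findStr_append_new {L : List (Int × List Char)} {n : Int} (t : List Char)
    (h : findStr L n = none) : findStr (L ++ [(n, t)]) n = some t := by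
  rw [findStr_append_single, h, if_pos rfl]; rfl

theorem findCode_append_new {L : List (Int × List Char)} {q : List Char} {n : Int} {t : List Char}
    (h : findCode L q = none) (hbk : bkey t = bkey q) :
    findCode (L ++ [(n, t)]) q = some n := by
  rw [findCode_append_single, h, if_pos hbk]; rfl

theorem search_insert_append {t : Trie} {L : List (Int × List Char)} {K : List Char} {n : Int}
    (hq : ∀ q, trieSearch t q = findCode L q) (hfresh : findCode L K = none) :
    ∀ q, trieSearch (trieInsert t K n) q = findCode (L ++ [(n, K)]) q := by
  intro q
  rw [trieSearch_insert, hq q, findCode_append_single]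
  cases hL : findCode L q with
  | some w =>
    have hne : ¬ bkey q = bkey K := by
      intro hbe
      rw [findCode_congr L hbe, hfresh] at hL
      simp at hL
    rw [if_neg hne]; simp
  | none =>
    simp only [Option.none_or]
    by_cases hbe : bkey q = bkey K
    · rw [if_pos hbe, if_pos hbe.symm]
    · rw [if_neg hbe, if_neg (fun h : bkey K = bkey q => hbe h.symm)]

theorem LZInv_cur {Full : List (Int × List Char)} {a : AState} {b : BState} (h : LZInv Full a b)
    {sc : List Char} {cc : Int}
    (hrel : 0 ≤ cc ∧ ∃ s', findStr Full cc = some s' ∧ bkey s' = bkey sc ∧ findCode Full sc = some cc) :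
    LZInv Full { a with cur := sc } { b with cur := cc } :=
  ⟨h.search_eq, h.table_sub, h.decomp, Or.inr hrel, h.codes_lb, h.len_ge, h.str_code,
   h.code_str, h.base, h.nc_ge, h.eq_nc, h.eq_bl, h.eq_mt, h.eq_out⟩

theorem LZInv_out {Full : List (Int × List Char)} {a : AState} {b : BState} (h : LZInv Full a b)
    {sc : List Char} {cc : Int} (c : Int)
    (hrel : 0 ≤ cc ∧ ∃ s', findStr Full cc = some s' ∧ bkey s' = bkey sc ∧ findCode Full sc = some cc) :
    LZInv Full { a with cur := sc, out := a.out ++ [c] } { b with cur := cc, out := b.out ++ [c] } :=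
  ⟨h.search_eq, h.table_sub, h.decomp, Or.inr hrel, h.codes_lb, h.len_ge, h.str_code,
   h.code_str, h.base, h.nc_ge, h.eq_nc, h.eq_bl, h.eq_mt, by simp [h.eq_out]⟩

theorem LZInv_insert {Full : List (Int × List Char)} {a : AState} {b : BState} (h : LZInv Full a b)
    {bsInt : Int} (hbs0 : 0 ≤ bsInt) (hbs256 : bsInt < 256)
    {s' : List Char} (hstr : findStr Full b.cur = some s') (hbk : bkey s' = bkey a.cur)
    (hlookn : b.table.get? (b.cur, bsInt) = none)
    (hfreshQ : findCode Full (a.cur ++ pyFormat08b bsInt) = none)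
    {abl amt bbl bmt : Int} (hbl : abl = bbl) (hmt : amt = bmt) :
    LZInv (Full ++ [(a.nextCode, a.cur ++ pyFormat08b bsInt)])
      { trie := trieInsert a.trie (a.cur ++ pyFormat08b bsInt) a.nextCode,
        cur := pyFormat08b bsInt, nextCode := a.nextCode + 1, bitLimit := abl, maxTable := amt,
        out := a.out ++ [b.cur] }
      { table := b.table.insert (b.cur, bsInt) b.nextCode,
        cur := bsInt, nextCode := b.nextCode + 1, bitLimit := bbl, maxTable := bmt,
        out := b.out ++ [b.cur] } := by
  have hb0 : 0 ≤ b.cur := (h.codes_lb _ (findStr_mem hstr)).1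
  have hbkc : bkey (a.cur ++ pyFormat08b bsInt) = bkey (s' ++ pyFormat08b bsInt) := by
    rw [bkey_append, bkey_append, hbk]
  have hfreshS : findCode Full (s' ++ pyFormat08b bsInt) = none := by
    rw [← findCode_congr Full hbkc]; exact hfreshQ
  have hbase := h.base _ hbs0 hbs256
  refine ⟨?_, ?_, ?_, ?_, ?_, ?_, ?_, ?_, ?_, ?_, ?_, ?_, ?_, ?_⟩
  · exact search_insert_append h.search_eq hfreshQ
  · -- table_sub
    intro p bb v hget
    simp only [PySem.Dict.get?_insert] at hget
    by_cases hpb : (p, bb) = (b.cur, bsInt)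
    · rw [if_pos hpb] at hget
      obtain ⟨hp, hbb⟩ := Prod.mk.injEq .. ▸ hpb
      subst hp; subst hbb
      obtain rfl : b.nextCode = v := Option.some.inj hget
      refine ⟨s', findStr_append_of_some _ hstr, ?_⟩
      have hnew := findCode_append_new (n := a.nextCode) hfreshS hbkc
      rw [← h.eq_nc]
      exact hnew
    · rw [if_neg hpb] at hget
      obtain ⟨sp, h1, h2⟩ := h.table_sub p bb v hget
      exact ⟨sp, findStr_append_of_some _ h1, findCode_append_of_some _ h2⟩
  · -- decomp
    intro e he
    rcases List.mem_append.mp he with hold | hnew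
    · rcases h.decomp e hold with h8 | ⟨p, sp, bb, hbb0, hbb256, hfsp, hbkt, hget⟩
      · exact Or.inl h8
      · refine Or.inr ⟨p, sp, bb, hbb0, hbb256, findStr_append_of_some _ hfsp, hbkt, ?_⟩
        simp only [PySem.Dict.get?_insert]
        by_cases hpb : (p, bb) = (b.cur, bsInt)
        · rw [hpb] at hget; rw [hget] at hlookn; simp at hlookn
        · rw [if_neg hpb]; exact hget
    · obtain rfl : e = (a.nextCode, a.cur ++ pyFormat08b bsInt) := by simpa using hnew
      refine Or.inr ⟨b.cur, s', bsInt, hbs0, hbs256, findStr_append_of_some _ hstr, ?_, ?_⟩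
      · simp only [bkey_append, hbk]
      · rw [PySem.Dict.get?_insert, if_pos rfl, h.eq_nc]
  · -- cur_rel
    exact Or.inr ⟨hbs0, pyFormat08b bsInt, findStr_append_of_some _ hbase.1, rfl,
      findCode_append_of_some _ hbase.2⟩
  · -- codes_lb
    intro e he
    rcases List.mem_append.mp he with hold | hnew
    · have hcl := h.codes_lb e hold
      refine ⟨hcl.1, ?_⟩
      have h2 := hcl.2
      show e.1 < a.nextCode + 1
      omega
    · obtain rfl : e = (a.nextCode, a.cur ++ pyFormat08b bsInt) := by simpa using hnew
      exact ⟨le_trans (by norm_num) h.nc_ge, by show a.nextCode < a.nextCode + 1; omega⟩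
  · -- len_ge
    intro e he
    rcases List.mem_append.mp he with hold | hnew
    · exact h.len_ge e hold
    · obtain rfl : e = (a.nextCode, a.cur ++ pyFormat08b bsInt) := by simpa using hnew
      simp [List.length_append, pyFormat08b_length]
  · -- str_code
    intro c s hcs
    rw [findStr_append_single] at hcs
    cases hold : findStr Full c with
    | some s0 =>
      rw [hold] at hcs
      obtain rfl : s0 = s := Option.some.inj hcs
      exact findCode_append_of_some _ (h.str_code c s0 hold)
    | none =>
      rw [hold] at hcs
      simp only [Option.none_or] at hcs
      by_cases hnc : a.nextCode = c
      · rw [if_pos hnc] at hcs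
        obtain rfl : a.cur ++ pyFormat08b bsInt = s := Option.some.inj hcs
        rw [← hnc]
        exact findCode_append_new hfreshQ rfl
      · rw [if_neg hnc] at hcs; simp at hcs
  · -- code_str
    intro q c hqc
    rw [findCode_append_single] at hqc
    cases hold : findCode Full q with
    | some w =>
      rw [hold] at hqc
      obtain rfl : w = c := Option.some.inj hqc
      obtain ⟨t, h1, h2⟩ := h.code_str q w hold
      exact ⟨t, findStr_append_of_some _ h1, h2⟩
    | none =>
      rw [hold] at hqc
      simp only [Option.none_or] at hqc
      by_cases hbq : bkey (a.cur ++ pyFormat08b bsInt) = bkey q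
      · rw [if_pos hbq] at hqc
        obtain rfl : a.nextCode = c := Option.some.inj hqc
        exact ⟨a.cur ++ pyFormat08b bsInt,
          findStr_append_new _ (findStr_fresh (fun e he => (h.codes_lb e he).2)), hbq⟩
      · rw [if_neg hbq] at hqc; simp at hqc
  · -- base
    intro i h0 h1
    exact ⟨findStr_append_of_some _ (h.base i h0 h1).1,
      findCode_append_of_some _ (h.base i h0 h1).2⟩
  · have := h.nc_ge; simp; omega
  · simp [h.eq_nc]
  · exact hbl
  · exact hmt
  · simp [h.eq_out]

theorem step_inv (mbl : Int) (Full : List (Int × List Char)) (a : AState) (b : BState)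
    (sym : Char) (hc : sym.toNat < 256) (h : LZInv Full a b) :
    ∃ Full', LZInv Full' (stepA mbl a sym) (stepB mbl b sym) := by
  have hbs0 : (0 : Int) ≤ (sym.toNat : Int) := by positivity
  have hbs256 : ((sym.toNat : Int)) < 256 := by exact_mod_cast hc
  have hbase := h.base _ hbs0 hbs256
  rcases hcr : h.cur_rel with ⟨ha, hb⟩ | ⟨hb0, s', hstr, hbk, hcode⟩
  · -- empty current match: the single 8-bit block is always found
    have hsc : trieSearch a.trie (a.cur ++ pyFormat08b (sym.toNat : Int))
        = some (sym.toNat : Int) := by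
      rw [h.search_eq, ha, List.nil_append]; exact hbase.2
    have hA : stepA mbl a sym = { a with cur := a.cur ++ pyFormat08b (sym.toNat : Int) } := by
      unfold stepA; rw [hsc]
    have hB : stepB mbl b sym = { b with cur := (sym.toNat : Int) } := by
      unfold stepB; rw [if_pos hb]
    rw [hA, hB]
    refine ⟨Full, LZInv_cur h ⟨hbs0, pyFormat08b (sym.toNat : Int), hbase.1, ?_, ?_⟩⟩
    · rw [ha, List.nil_append]
    · rw [ha, List.nil_append]; exact hbase.2
  · -- current match is a real code
    have hbne : ¬ b.cur = -1 := by intro hx; rw [hx] at hb0; norm_num at hb0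
    have hbkc : bkey (a.cur ++ pyFormat08b (sym.toNat : Int))
        = bkey (s' ++ pyFormat08b (sym.toNat : Int)) := by
      rw [bkey_append, bkey_append, hbk]
    cases hlook : b.table.get? (b.cur, (sym.toNat : Int)) with
    | some v =>
      obtain ⟨sp, hsp, hcodev⟩ := h.table_sub _ _ _ hlook
      obtain rfl : sp = s' := by rw [hstr] at hsp; exact (Option.some.inj hsp).symm
      have hsc : trieSearch a.trie (a.cur ++ pyFormat08b (sym.toNat : Int)) = some v := by
        rw [h.search_eq, findCode_congr Full hbkc]; exact hcodev
      obtain ⟨t, htv, hbt⟩ := h.code_str _ _ hcodev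
      have hv0 : 0 ≤ v := (h.codes_lb _ (findStr_mem htv)).1
      have hA : stepA mbl a sym = { a with cur := a.cur ++ pyFormat08b (sym.toNat : Int) } := by
        unfold stepA; rw [hsc]
      have hB : stepB mbl b sym = { b with cur := v } := by
        unfold stepB; rw [if_neg hbne, hlook]
      rw [hA, hB]
      refine ⟨Full, LZInv_cur h ⟨hv0, t, htv, by rw [hbt, ← hbkc], ?_⟩⟩
      rw [findCode_congr Full hbkc]; exact hcodev
    | none =>
      -- A's trie search must miss too
      have hscn : trieSearch a.trie (a.cur ++ pyFormat08b (sym.toNat : Int)) = none := by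
        rw [h.search_eq]
        cases hfc : findCode Full (a.cur ++ pyFormat08b (sym.toNat : Int)) with
        | none => rfl
        | some w =>
          exfalso
          have hfc' : findCode Full (s' ++ pyFormat08b (sym.toNat : Int)) = some w := by
            rw [← findCode_congr Full hbkc]; exact hfc
          obtain ⟨t, htmem, hbt⟩ := findCode_mem hfc'
          rcases h.decomp _ htmem with hlen | ⟨p, sp, bb, hbb0, hbb256, hfsp, hbkt, hget⟩
          · have hlen' : t.length = 8 := hlen
            have h8 : 8 ≤ s'.length := by
              have := h.len_ge _ (findStr_mem hstr); simpa using this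
            have hlt : t.length = s'.length + 8 := by
              have hl := congrArg List.length hbt
              rw [bkey_length, bkey_length, List.length_append, pyFormat08b_length] at hl
              omega
            omega
          · have heqk : bkey sp ++ bkey (pyFormat08b bb)
                = bkey s' ++ bkey (pyFormat08b (sym.toNat : Int)) := by
              rw [← hbkt, hbt, bkey_append]
            have hlen8 : (bkey (pyFormat08b bb)).length
                = (bkey (pyFormat08b (sym.toNat : Int))).length := by
              rw [bkey_length, bkey_length, pyFormat08b_length, pyFormat08b_length]
            obtain ⟨hsp_eq, henc_eq⟩ := List.append_inj' heqk hlen8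
            have hbbs : bb = (sym.toNat : Int) :=
              pyFormat08b_bkey_inj hbb0 hbb256 hbs0 hbs256 henc_eq
            have hpcur : p = b.cur := by
              have h1 : findCode Full sp = some p := h.str_code _ _ hfsp
              have h2 : findCode Full sp = some b.cur := by
                rw [findCode_congr Full hsp_eq, findCode_congr Full hbk]; exact hcode
              rw [h1] at h2; exact Option.some.inj h2
            rw [hpcur, hbbs] at hget
            rw [hget] at hlook
            simp at hlook
      have hscur : trieSearch a.trie a.cur = some b.cur := by
        rw [h.search_eq]; exact hcode
      by_cases hins : a.nextCode < a.maxTable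
      · have hinsB : b.nextCode < b.maxTable := by rw [← h.eq_nc, ← h.eq_mt]; exact hins
        by_cases hgrow : a.maxTable ≤ a.nextCode + 1 ∧ a.bitLimit < mbl
        · have hgrowB : b.maxTable ≤ b.nextCode + 1 ∧ b.bitLimit < mbl := by
            rw [← h.eq_nc, ← h.eq_mt, ← h.eq_bl]; exact hgrow
          have hA : stepA mbl a sym =
              { trie := trieInsert a.trie (a.cur ++ pyFormat08b (sym.toNat : Int)) a.nextCode,
                cur := pyFormat08b (sym.toNat : Int), nextCode := a.nextCode + 1,
                bitLimit := a.bitLimit + 1, maxTable := pyPow2 (a.bitLimit + 1),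
                out := a.out ++ [b.cur] } := by
            unfold stepA; rw [hscn, hscur]; simp only [if_pos hins, if_pos hgrow]
          have hB : stepB mbl b sym =
              { table := b.table.insert (b.cur, (sym.toNat : Int)) b.nextCode,
                cur := (sym.toNat : Int), nextCode := b.nextCode + 1,
                bitLimit := b.bitLimit + 1, maxTable := pyPow2 (b.bitLimit + 1),
                out := b.out ++ [b.cur] } := by
            unfold stepB; rw [if_neg hbne, hlook]; simp only [if_pos hinsB, if_pos hgrowB]
          rw [hA, hB]
          exact ⟨_, LZInv_insert h hbs0 hbs256 hstr hbk hlook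
            (by rw [← h.search_eq]; exact hscn) (by rw [h.eq_bl]) (by rw [h.eq_bl])⟩
        · have hgrowB : ¬ (b.maxTable ≤ b.nextCode + 1 ∧ b.bitLimit < mbl) := by
            rw [← h.eq_nc, ← h.eq_mt, ← h.eq_bl]; exact hgrow
          have hA : stepA mbl a sym =
              { trie := trieInsert a.trie (a.cur ++ pyFormat08b (sym.toNat : Int)) a.nextCode,
                cur := pyFormat08b (sym.toNat : Int), nextCode := a.nextCode + 1,
                bitLimit := a.bitLimit, maxTable := a.maxTable,
                out := a.out ++ [b.cur] } := by
            unfold stepA; rw [hscn, hscur]; simp only [if_pos hins, if_neg hgrow]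
          have hB : stepB mbl b sym =
              { table := b.table.insert (b.cur, (sym.toNat : Int)) b.nextCode,
                cur := (sym.toNat : Int), nextCode := b.nextCode + 1,
                bitLimit := b.bitLimit, maxTable := b.maxTable,
                out := b.out ++ [b.cur] } := by
            unfold stepB; rw [if_neg hbne, hlook]; simp only [if_pos hinsB, if_neg hgrowB]
          rw [hA, hB]
          exact ⟨_, LZInv_insert h hbs0 hbs256 hstr hbk hlook
            (by rw [← h.search_eq]; exact hscn) h.eq_bl h.eq_mt⟩
      · have hinsB : ¬ b.nextCode < b.maxTable := by rw [← h.eq_nc, ← h.eq_mt]; exact hins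
        have hA : stepA mbl a sym =
            { a with cur := pyFormat08b (sym.toNat : Int), out := a.out ++ [b.cur] } := by
          unfold stepA; rw [hscn, hscur]; simp only [if_neg hins]
        have hB : stepB mbl b sym =
            { b with cur := (sym.toNat : Int), out := b.out ++ [b.cur] } := by
          unfold stepB; rw [if_neg hbne, hlook]; simp only [if_neg hinsB]
        rw [hA, hB]
        exact ⟨Full, LZInv_out h b.cur ⟨hbs0, pyFormat08b (sym.toNat : Int), hbase.1, rfl, hbase.2⟩⟩

theorem fold_inv (mbl : Int) : ∀ (l : List Char) (Full : List (Int × List Char))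
    (a : AState) (b : BState), LZInv Full a b → (∀ c ∈ l, c.toNat < 256) →
    ∃ Full', LZInv Full' (l.foldl (stepA mbl) a) (l.foldl (stepB mbl) b) := by
  intro l
  induction l with
  | nil => intro Full a b h _; exact ⟨Full, h⟩
  | cons c cs ih =>
    intro Full a b h hall
    obtain ⟨Full', h'⟩ := step_inv mbl Full a b c (hall c (List.mem_cons_self ..)) h
    exact ih Full' _ _ h' (fun d hd => hall d (List.mem_cons_of_mem _ hd))

theorem finish_inv (Full : List (Int × List Char)) (sa : AState) (sb : BState)
    (h : LZInv Full sa sb) :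
    (if sa.cur ≠ [] then
      match trieSearch sa.trie sa.cur with
      | some code => (sa.out ++ [code], sa.bitLimit)
      | none => (sa.out, sa.bitLimit)
     else (sa.out, sa.bitLimit))
    = (if sb.cur ≠ -1 then (sb.out ++ [sb.cur], sb.bitLimit) else (sb.out, sb.bitLimit)) := by
  rcases h.cur_rel with ⟨ha, hb⟩ | ⟨hb0, s', hstr, hbk, hcode⟩
  · simp [ha, hb, h.eq_out, h.eq_bl]
  · obtain ⟨e, hfind, hes⟩ := Option.map_eq_some_iff.mp hstr
    have hmem := List.mem_of_find?_eq_some hfind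
    have hlen8 : 8 ≤ s'.length := by rw [← hes]; exact h.len_ge e hmem
    have hacur : sa.cur ≠ [] := by
      intro hnil
      rw [hnil] at hbk
      have hlb : (bkey s').length = (bkey ([] : List Char)).length := by rw [hbk]
      rw [bkey_length, bkey_length] at hlb
      simp only [List.length_nil] at hlb
      omega
    have hbcur : sb.cur ≠ -1 := by intro hx; rw [hx] at hb0; norm_num at hb0
    simp only [ne_eq, hacur, hbcur, not_false_eq_true, if_true,
      h.search_eq, hcode, h.eq_out, h.eq_bl]

-- ===== VERDICT (by name: the statement is the Claim_ definition above) =====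
theorem compress_with_variable_size_spec : Claim_equal_compress_with_variable_size := by
  intro text ibl mbl stats hdom
  unfold Spec_compress_with_variable_size
  unfold Dom_compress_with_variable_size at hdom
  have hchars : ∀ c ∈ text.toList, c.toNat < 256 := by
    intro c hcmem
    have h1 : pvDomStr text = true := by
      simp only [Bool.and_eq_true] at hdom; exact hdom.1.1.1
    have := (List.all_eq_true.mp h1) c hcmem
    simp only [pvDomChar, Bool.or_eq_true, Bool.and_eq_true, beq_iff_eq,
      decide_eq_true_eq] at this
    omega
  obtain ⟨Full, h⟩ := fold_inv mbl text.toList _ _ _ (init_inv ibl) hchars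
  exact finish_inv Full _ _ h
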